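-- pv_equiv track=rewrite | github.com/kinglongkk/hellWorld | bullCard/circle-resource/doc/outputContent/csv字体文字全部导出.py | setSentence
-- ===== SOURCE A (Python) =====
-- def setWords(words):
--     try:
--         words = int(words)
--         words = str(words)
--     except:
--         if len(words) > 1 and words[0] == '"':
--             return words
--         words = '"' + words + '"'
--     return words
--
-- def setSentence(line, isTop):
--     words = ""
--     chart1 = '"'
--     chart2 = ','
--     hadChart1 = False
--     needD = '';
--     for word in line:
--         if word != chart1:
--             if hadChart1:
--                 words += word
--             else:
--                 if word != chart2:
--                     words += word
--                 else:
--                     words = setWords(words)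
--                     needD += (words + chart2)
--                     words = ""
--         else:
--             words += chart1
--             if hadChart1:
--                 hadChart1 = False
--             else:
--                 hadChart1 = True
--     if words != "":
--         if not isTop:
--             words = words[:-1]
--         words = setWords(words)
--         needD += words
--         words = ""
--     return needD
-- ===== SOURCE B (Python) =====
-- def setWords(w):
--     try:
--         return str(int(w))
--     except ValueError:
--         return w if len(w) > 1 and w[0] == '"' else '"' + w + '"'
--
-- def cut(s):
--     # index of the first comma lying at even quote parity in s, else -1
--     p = False
--     for i, c in enumerate(s):
--         if c == '"':
--             p = not p
--         elif c == ',' and not p: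
--             return i
--     return -1
--
-- def setSentence(line, isTop):
--     # Repeatedly find the next splitting comma and slice it off (like iterated
--     # str.find); restarting the parity at False is sound because a splitting
--     # comma always sits at even global parity.
--     mid, rest = [], line
--     while (i := cut(rest)) != -1:
--         mid.append(rest[:i])
--         rest = rest[i+1:]
--     out = ''.join(setWords(f) + ',' for f in mid)
--     if rest:
--         out += setWords(rest if isTop else rest[:-1])
--     return out
-- ===== Notes on version B (the rewrite author's own statement) =====
-- stated objective: simpler
-- what changed: B replaces A's one-pass character state machine (accumulate field chars, flush into one growing output string at each unquoted comma) by repeatedly finding the index of the next splitting comma and slicing the line there, then rendering the resulting field list with setWords and a join; restarting the quote parity after each cut is sound because a splitting comma always sits at even global parity.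
import Mathlib
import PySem

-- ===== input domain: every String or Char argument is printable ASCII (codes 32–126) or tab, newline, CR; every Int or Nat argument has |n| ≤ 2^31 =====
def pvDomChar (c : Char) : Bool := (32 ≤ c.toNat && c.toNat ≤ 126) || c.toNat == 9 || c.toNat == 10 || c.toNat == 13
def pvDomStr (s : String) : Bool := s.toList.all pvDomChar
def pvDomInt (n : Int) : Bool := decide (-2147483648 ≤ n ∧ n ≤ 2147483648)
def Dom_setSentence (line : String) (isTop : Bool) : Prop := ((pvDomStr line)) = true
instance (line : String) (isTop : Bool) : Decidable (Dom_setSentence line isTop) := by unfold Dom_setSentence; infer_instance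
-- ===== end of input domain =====

-- B replaces A's one-pass flush-as-you-go state machine by repeatedly finding the
-- next splitting comma and slicing the line there (iterated find + slice), then
-- rendering the resulting field list; same cost, simpler decomposition.

-- ===== PORT A =====
-- setWords of Source A: int(words) via PySem.Int.ofChars? (exact for int(s)); the bare except only sees ValueError here
def setWordsA (words : List Char) : List Char :=
  match PySem.Int.ofChars? words with
  | some n => PySem.Int.toChars n
  | none =>
      if words.length > 1 ∧ words[0]? = some '"' then words
      else '"' :: (words ++ ['"'])

-- one iteration of A's for-loop over the state (words, hadChart1, needD)
def stepA (st : List Char × Bool × List Char) (word : Char) : List Char × Bool × List Char :=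
  let (words, had, needD) := st
  if word ≠ '"' then
    if had then (words ++ [word], had, needD)
    else
      if word ≠ ',' then (words ++ [word], had, needD)
      else ([], had, needD ++ (setWordsA words ++ [',']))
  else (words ++ ['"'], !had, needD)

def setSentence (line : String) (isTop : Bool) : String :=
  let st := line.toList.foldl stepA ([], false, [])
  let words := st.1
  let needD := st.2.2
  if words ≠ [] then
    let words := if !isTop then PySem.List.slice words none (some (-1)) else words
    String.ofList (needD ++ setWordsA words)
  else String.ofList needD

-- ===== PORT B =====
def setWordsB (w : List Char) : List Char :=
  match PySem.Int.ofChars? w with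
  | some n => PySem.Int.toChars n
  | none =>
      if w.length > 1 ∧ w[0]? = some '"' then w
      else '"' :: (w ++ ['"'])

-- Source B's cut: the for-loop scanning for the first comma at even quote parity
-- (index built by +1 on the way out of the recursion; -1 = not found, as in Python)
def cutGo : List Char → Bool → Int
  | [], _ => -1
  | c :: t, p =>
    if c = '"' then (let r := cutGo t (!p); if r = -1 then -1 else r + 1)
    else if c = ',' ∧ p = false then 0
    else (let r := cutGo t p; if r = -1 then -1 else r + 1)

def cutB (s : List Char) : Int := cutGo s false

-- bound cited by splitLoop's termination proof
theorem cutGo_bounds (s : List Char) (p : Bool) :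
    cutGo s p = -1 ∨ (0 ≤ cutGo s p ∧ cutGo s p < s.length) := by
  induction s generalizing p with
  | nil => left; rfl
  | cons c t ih =>
    simp only [cutGo, List.length_cons]
    by_cases hq : c = '"'
    · rw [if_pos hq]
      rcases ih (!p) with h | h
      · rw [if_pos h]; left; rfl
      · rw [if_neg (show ¬(cutGo t (!p) = -1) by omega)]; right; push_cast; omega
    · rw [if_neg hq]
      by_cases hc : c = ',' ∧ p = false
      · rw [if_pos hc]
        right
        constructor
        · omega
        · push_cast; omega
      · rw [if_neg hc]
        rcases ih p with h | h
        · rw [if_pos h]; left; rfl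
        · rw [if_neg (show ¬(cutGo t p = -1) by omega)]; right; push_cast; omega


-- Source B's while-loop: peel off the field before each found comma (rest[:i] = take,
-- rest[i+1:] = drop, exact for the nonnegative in-range index cut returns)
def splitLoop (mid : List (List Char)) (rest : List Char) : List (List Char) × List Char :=
  let i := cutB rest
  if h : i = -1 then (mid, rest)
  else splitLoop (mid ++ [rest.take i.toNat]) (rest.drop (i.toNat + 1))
termination_by rest.length
decreasing_by
  rcases cutGo_bounds rest false with hb | hb
  · exact absurd hb h
  · simp only [List.length_drop]
    have h2 : cutB rest < rest.length := hb.2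
    have h1 : 0 ≤ cutB rest := hb.1
    omega

def setSentence_alt (line : String) (isTop : Bool) : String :=
  let st := splitLoop [] line.toList
  let mid := st.1
  let rest := st.2
  let out := (mid.map (fun f => setWordsB f ++ [','])).flatten
  let out := if rest ≠ [] then
      out ++ setWordsB (if isTop then rest else rest.dropLast)   -- rest[:-1] = dropLast
    else out
  String.ofList out

-- ===== PRECONDITION & SPEC =====
def Spec_setSentence (line : String) (isTop : Bool) (out : String) : Prop := out = setSentence_alt line isTop
instance (line : String) (isTop : Bool) (out : String) : Decidable (Spec_setSentence line isTop out) := by unfold Spec_setSentence; infer_instance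

-- ===== CLAIM =====
def Claim_equal_setSentence : Prop := ∀ (line : String) (isTop : Bool), Dom_setSentence line isTop → Spec_setSentence line isTop (setSentence line isTop)

-- ===== LEMMAS AND PROOFS =====

theorem setWords_eq (w : List Char) : setWordsA w = setWordsB w := rfl

theorem stepA_quote (w : List Char) (p : Bool) (nd : List Char) :
    stepA (w, p, nd) '"' = (w ++ ['"'], !p, nd) := rfl

theorem stepA_acc (c : Char) (p : Bool) (hq : c ≠ '"') (hc : ¬(c = ',' ∧ p = false))
    (w nd : List Char) : stepA (w, p, nd) c = (w ++ [c], p, nd) := by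
  cases p
  · have hcc : c ≠ ',' := fun h => hc ⟨h, rfl⟩
    simp [stepA, hq, hcc]
  · simp [stepA, hq]

theorem stepA_comma (w nd : List Char) :
    stepA (w, false, nd) ',' = ([], false, nd ++ (setWordsA w ++ [','])) := rfl

theorem foldl_stepA_none (rest : List Char) : ∀ (p : Bool) (w nd : List Char),
    cutGo rest p = -1 →
    ∃ q, rest.foldl stepA (w, p, nd) = (w ++ rest, q, nd) := by
  induction rest with
  | nil => intro p w nd _; exact ⟨p, by simp⟩
  | cons c t ih =>
    intro p w nd h
    simp only [cutGo] at h
    by_cases hq : c = '"'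
    · rw [if_pos hq] at h
      have ht : cutGo t (!p) = -1 := by
        rcases cutGo_bounds t (!p) with h' | h'
        · exact h'
        · rw [if_neg (show ¬(cutGo t (!p) = -1) by omega)] at h; omega
      obtain ⟨q, hf⟩ := ih (!p) (w ++ ['"']) nd ht
      refine ⟨q, ?_⟩
      subst hq
      rw [List.foldl_cons, stepA_quote, hf]
      simp only [List.append_assoc, List.singleton_append]
    · rw [if_neg hq] at h
      by_cases hc : c = ',' ∧ p = false
      · rw [if_pos hc] at h; omega
      · have ht : cutGo t p = -1 := by
          rcases cutGo_bounds t p with h' | h'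
          · exact h'
          · rw [if_neg (show ¬(cutGo t p = -1) by omega)] at h; omega
        obtain ⟨q, hf⟩ := ih p (w ++ [c]) nd ht
        refine ⟨q, ?_⟩
        rw [List.foldl_cons, stepA_acc c p hq hc, hf]
        simp only [List.append_assoc, List.singleton_append]

theorem foldl_stepA_cut (rest : List Char) : ∀ (p : Bool) (n : Nat) (w nd : List Char),
    cutGo rest p = (n : Int) →
    rest.foldl stepA (w, p, nd) =
      (rest.drop (n + 1)).foldl stepA
        ([], false, nd ++ (setWordsA (w ++ rest.take n) ++ [','])) := by
  induction rest with
  | nil => intro p n w nd h; exfalso; simp only [cutGo] at h; omega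
  | cons c t ih =>
    intro p n w nd h
    simp only [cutGo] at h
    by_cases hq : c = '"'
    · rw [if_pos hq] at h
      have hne : cutGo t (!p) ≠ -1 := by
        intro h0; rw [if_pos h0] at h; omega
      rw [if_neg hne] at h
      have h0 : 0 ≤ cutGo t (!p) := by
        rcases cutGo_bounds t (!p) with h' | h'
        · exact absurd h' hne
        · exact h'.1
      obtain ⟨m, hm⟩ : ∃ m : ℕ, cutGo t (!p) = (m : Int) :=
        ⟨(cutGo t (!p)).toNat, (Int.toNat_of_nonneg h0).symm⟩
      have hn : n = m + 1 := by rw [hm] at h; omega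
      subst hq hn
      rw [List.foldl_cons, stepA_quote, ih (!p) m (w ++ ['"']) nd hm]
      simp only [List.drop_succ_cons, List.take_succ_cons, List.append_assoc, List.singleton_append]
    · rw [if_neg hq] at h
      by_cases hc : c = ',' ∧ p = false
      · rw [if_pos hc] at h
        have hn : n = 0 := by omega
        subst hn
        obtain ⟨hc1, hc2⟩ := hc
        subst hc1 hc2
        rw [List.foldl_cons, stepA_comma]
        simp only [List.drop_succ_cons, List.drop_zero, List.take_zero, List.append_nil]
      · rw [if_neg hc] at h
        have hne : cutGo t p ≠ -1 := by
          intro h0; rw [if_pos h0] at h; omega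
        rw [if_neg hne] at h
        have h0 : 0 ≤ cutGo t p := by
          rcases cutGo_bounds t p with h' | h'
          · exact absurd h' hne
          · exact h'.1
        obtain ⟨m, hm⟩ : ∃ m : ℕ, cutGo t p = (m : Int) :=
          ⟨(cutGo t p).toNat, (Int.toNat_of_nonneg h0).symm⟩
        have hn : n = m + 1 := by rw [hm] at h; omega
        subst hn
        rw [List.foldl_cons, stepA_acc c p hq hc, ih p m (w ++ [c]) nd hm]
        simp only [List.drop_succ_cons, List.take_succ_cons, List.append_assoc, List.singleton_append]

theorem splitLoop_none (rest : List Char) (hc : cutB rest = -1) (mid : List (List Char)) :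
    splitLoop mid rest = (mid, rest) := by
  rw [splitLoop]; simp [hc]

theorem splitLoop_cons (rest : List Char) (hc : ¬ cutB rest = -1) (mid : List (List Char)) :
    splitLoop mid rest =
      splitLoop (mid ++ [rest.take (cutB rest).toNat]) (rest.drop ((cutB rest).toNat + 1)) := by
  conv_lhs => rw [splitLoop]
  simp [hc]

theorem splitLoop_acc (rest : List Char) (mid : List (List Char)) :
    splitLoop mid rest = (mid ++ (splitLoop [] rest).1, (splitLoop [] rest).2) := by
  suffices H : ∀ (k : Nat) (rest : List Char), rest.length ≤ k → ∀ mid,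
      splitLoop mid rest = (mid ++ (splitLoop [] rest).1, (splitLoop [] rest).2) from
    H rest.length rest le_rfl mid
  intro k
  induction k with
  | zero =>
    intro rest hle mid
    have hrest : rest = [] := by
      cases rest with
      | nil => rfl
      | cons a b => simp at hle
    subst hrest
    have hnil : cutB ([] : List Char) = -1 := rfl
    rw [splitLoop_none _ hnil, splitLoop_none _ hnil]
    simp only [List.append_nil]
  | succ k ih =>
    intro rest hle mid
    by_cases hc : cutB rest = -1
    · rw [splitLoop_none _ hc, splitLoop_none _ hc]
      simp only [List.append_nil]
    · have hb : 0 ≤ cutB rest ∧ cutB rest < rest.length := by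
        rcases cutGo_bounds rest false with h' | h'
        · exact absurd h' hc
        · exact h'
      have hlen : (rest.drop ((cutB rest).toNat + 1)).length ≤ k := by
        simp only [List.length_drop]
        have h2 := hb.2
        have h1 := hb.1
        omega
      rw [splitLoop_cons _ hc, splitLoop_cons _ hc]
      rw [ih _ hlen (mid ++ [rest.take (cutB rest).toNat]),
          ih _ hlen ([] ++ [rest.take (cutB rest).toNat])]
      simp only [List.nil_append, List.append_assoc]

theorem mainA (rest : List Char) (nd : List Char) :
    (rest.foldl stepA ([], false, nd)).1 = (splitLoop [] rest).2 ∧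
    (rest.foldl stepA ([], false, nd)).2.2 =
      nd ++ ((splitLoop [] rest).1.map (fun f => setWordsA f ++ [','])).flatten := by
  suffices H : ∀ (k : Nat) (rest : List Char), rest.length ≤ k → ∀ nd,
      (rest.foldl stepA ([], false, nd)).1 = (splitLoop [] rest).2 ∧
      (rest.foldl stepA ([], false, nd)).2.2 =
        nd ++ ((splitLoop [] rest).1.map (fun f => setWordsA f ++ [','])).flatten from
    H rest.length rest le_rfl nd
  intro k
  induction k with
  | zero =>
    intro rest hle nd
    have hrest : rest = [] := by
      cases rest with
      | nil => rfl
      | cons a b => simp at hle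
    subst hrest
    rw [splitLoop_none _ rfl]
    simp only [List.foldl_nil, List.map_nil, List.flatten_nil, List.append_nil]
    exact ⟨trivial, trivial⟩
  | succ k ih =>
    intro rest hle nd
    by_cases hc : cutB rest = -1
    · obtain ⟨q, hf⟩ := foldl_stepA_none rest false [] nd hc
      rw [splitLoop_none _ hc]
      simp only [hf, List.nil_append, List.map_nil, List.flatten_nil, List.append_nil]
      exact ⟨trivial, trivial⟩
    · have hb : 0 ≤ cutB rest ∧ cutB rest < rest.length := by
        rcases cutGo_bounds rest false with h' | h'
        · exact absurd h' hc
        · exact h'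
      obtain ⟨m, hm⟩ : ∃ m : ℕ, cutB rest = (m : Int) :=
        ⟨(cutB rest).toNat, (Int.toNat_of_nonneg hb.1).symm⟩
      have hcut := foldl_stepA_cut rest false m [] nd hm
      simp only [List.nil_append] at hcut
      have hlen : (rest.drop (m + 1)).length ≤ k := by
        simp only [List.length_drop]
        have h2 := hb.2
        rw [hm] at h2
        have hmlt : m < rest.length := by exact_mod_cast h2
        omega
      obtain ⟨ih1, ih2⟩ := ih (rest.drop (m + 1)) hlen
        (nd ++ (setWordsA (rest.take m) ++ [',']))
      have hsplit : splitLoop [] rest =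
          ([rest.take m] ++ (splitLoop [] (rest.drop (m + 1))).1,
           (splitLoop [] (rest.drop (m + 1))).2) := by
        rw [splitLoop_cons _ hc, hm]
        simp only [Int.toNat_natCast, List.nil_append]
        rw [splitLoop_acc]
      constructor
      · rw [hcut, ih1, hsplit]
      · rw [hcut, ih2, hsplit]
        simp

-- ===== VERDICT =====
theorem setSentence_spec : Claim_equal_setSentence := by
  intro line isTop _
  unfold Spec_setSentence
  obtain ⟨h1, h2⟩ := mainA line.toList []
  simp only [List.nil_append] at h2
  simp only [setSentence, setSentence_alt, h1, h2, setWords_eq]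
  by_cases hr : (splitLoop [] line.toList).2 = []
  · simp [hr]
  · cases isTop <;> simp [hr, PySem.List.slice_to_neg_one]
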